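-- pv_equiv track=rewrite | github.com/sadra-f/LRKeywordExtraction | FeatureExtraction/Preprocess.py | remove_bad_words
-- ===== SOURCE A (Python) =====
-- import string
--
-- def remove_bad_words(words:list[str]):
--     res = []
--     for w in words:
--         if len(w) < 3:
--             continue
--         for v in string.punctuation:
--             if v in w:
--                 break
--         else:
--             for v in string.digits:
--                 if v in w:
--                     break
--             else:
--                 res.append(w)
--     return res
-- ===== SOURCE B (Python) =====
-- import string
--
-- def remove_bad_words(words: list[str]):
--     bad = set(string.punctuation + string.digits)
--     return [w for w in words if len(w) >= 3 and not any(c in bad for c in w)]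
-- ===== Notes on version B (the rewrite author's own statement) =====
-- stated objective: faster
-- what changed: Builds one set of forbidden characters (punctuation+digits) and keeps a word iff len>=3 and none of ITS characters is in that set, via a single comprehension with O(1) set lookups per character -- instead of A's nested for/else loops that scan the 42-char punctuation and 10-char digit alphabets doing a substring search over the word for each.
import Mathlib
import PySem

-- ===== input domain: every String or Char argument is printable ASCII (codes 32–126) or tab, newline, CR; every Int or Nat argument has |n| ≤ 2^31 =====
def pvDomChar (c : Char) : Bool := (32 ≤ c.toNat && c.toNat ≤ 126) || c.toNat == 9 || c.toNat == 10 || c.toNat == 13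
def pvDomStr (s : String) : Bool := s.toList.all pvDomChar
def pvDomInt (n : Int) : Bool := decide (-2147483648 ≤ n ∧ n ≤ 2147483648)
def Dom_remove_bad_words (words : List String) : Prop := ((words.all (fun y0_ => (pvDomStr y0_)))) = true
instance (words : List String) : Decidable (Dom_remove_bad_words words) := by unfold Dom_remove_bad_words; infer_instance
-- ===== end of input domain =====

-- B filters with ONE set of bad characters, scanning each word's characters, instead of A's
-- nested for/else loops over the punctuation and digit alphabets doing substring searches (idiomatic).

-- ===== PORT A =====
-- string.punctuation and string.digits as lists of 1-char candidates, iterated in order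
def pvPunct : List Char := "!\"#$%&'()*+,-./:;<=>?@[\\]^_`{|}~".toList
def pvDigits : List Char := "0123456789".toList

-- the 'for v in alphabet: if v in w: break / else:' loop — stops at the first hit
def pvHitLoop (vs : List Char) (w : String) : Bool :=
  match vs with
  | [] => false
  | v :: rest => if PySem.Str.isIn (String.ofList [v]) w then true else pvHitLoop rest w

def remove_bad_words (words : List String) : List String :=
  words.foldl (fun res w =>
    if PySem.Str.len w < 3 then res
    else if pvHitLoop pvPunct w then res
    else if pvHitLoop pvDigits w then res
    else res ++ [w]) []

-- ===== PORT B =====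
-- bad = set(string.punctuation + string.digits)
def pvBad : PySem.Set Char := PySem.Set.ofList ("!\"#$%&'()*+,-./:;<=>?@[\\]^_`{|}~0123456789".toList)

def remove_bad_words_alt (words : List String) : List String :=
  words.filter (fun w =>
    decide (3 ≤ PySem.Str.len w) && !(w.toList.any (fun c => PySem.Set.contains pvBad c)))

-- ===== PRECONDITION & SPEC =====
def Spec_remove_bad_words (words : List String) (out : List String) : Prop := out = remove_bad_words_alt words
instance (words : List String) (out : List String) : Decidable (Spec_remove_bad_words words out) := by unfold Spec_remove_bad_words; infer_instance

-- ===== CLAIM (what is proved, stated in full; the proofs are below) =====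
def Claim_equal_remove_bad_words : Prop := ∀ (words : List String), Dom_remove_bad_words words → Spec_remove_bad_words words (remove_bad_words words)

-- ===== LEMMAS AND PROOFS =====

-- a single character is a substring iff it is a member
theorem chars_isIn_singleton (c : Char) (l : List Char) :
    PySem.Chars.isIn [c] l = l.contains c := by
  by_cases h : c ∈ l
  · obtain ⟨s, t, hst⟩ := List.append_of_mem h
    have hinf : [c] <:+: l := ⟨s, t, by rw [hst]; simp⟩
    rw [(PySem.Chars.isIn_iff_infix [c] l).mpr hinf]
    simp [h]
  · have hni : ¬ ([c] <:+: l) := fun hinf => h (hinf.subset (by simp))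
    rw [(PySem.Chars.isIn_eq_false_iff [c] l).mpr hni]
    simp [h]

theorem isIn_singleton_eq_mem (c : Char) (w : String) :
    PySem.Str.isIn (String.ofList [c]) w = w.toList.contains c := by
  simp [chars_isIn_singleton]

-- the break-on-first-hit loop is 'any'
theorem pvHitLoop_eq_any (vs : List Char) (w : String) :
    pvHitLoop vs w = vs.any (fun v => w.toList.contains v) := by
  induction vs with
  | nil => rfl
  | cons v rest ih =>
      simp only [pvHitLoop, isIn_singleton_eq_mem, ih, List.any_cons]
      by_cases h : v ∈ w.toList <;> simp [h]

-- membership in the bad-character set splits into the two alphabets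
theorem mem_pvBad (c : Char) :
    PySem.Set.contains pvBad c = true ↔ c ∈ pvPunct ∨ c ∈ pvDigits := by
  rw [PySem.Set.contains_iff]
  have hsplit : ("!\"#$%&'()*+,-./:;<=>?@[\\]^_`{|}~0123456789".toList : List Char)
      = pvPunct ++ pvDigits := by decide
  simp [pvBad, PySem.Set.mem_ofList, hsplit]

-- the per-word keep-decisions agree
theorem keep_agree (w : String) :
    (!(decide (PySem.Str.len w < 3)) && !(pvHitLoop pvPunct w) && !(pvHitLoop pvDigits w))
    = (decide (3 ≤ PySem.Str.len w) && !(w.toList.any (fun c => PySem.Set.contains pvBad c))) := by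
  have hlen : (decide (3 ≤ PySem.Str.len w)) = !(decide (PySem.Str.len w < 3)) := by
    apply Bool.eq_iff_iff.mpr
    simp
  have hbad : (w.toList.any (fun c => PySem.Set.contains pvBad c))
      = (pvHitLoop pvPunct w || pvHitLoop pvDigits w) := by
    simp only [pvHitLoop_eq_any]
    apply Bool.eq_iff_iff.mpr
    simp only [List.any_eq_true, List.contains_iff_mem, Bool.or_eq_true]
    constructor
    · rintro ⟨c, hc, hbadc⟩
      rcases (mem_pvBad c).mp hbadc with h | h
      · exact Or.inl ⟨c, h, hc⟩
      · exact Or.inr ⟨c, h, hc⟩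
    · rintro (⟨v, hv, hw⟩ | ⟨v, hv, hw⟩)
      · exact ⟨v, hw, (mem_pvBad v).mpr (Or.inl hv)⟩
      · exact ⟨v, hw, (mem_pvBad v).mpr (Or.inr hv)⟩
  rw [hlen, hbad]
  cases pvHitLoop pvPunct w <;> cases pvHitLoop pvDigits w <;> simp

-- ===== VERDICT (by name: the statement is the Claim_ definition above) =====
theorem remove_bad_words_spec : Claim_equal_remove_bad_words := by
  intro words _
  unfold Spec_remove_bad_words remove_bad_words remove_bad_words_alt
  have hbody : ∀ (res : List String) (w : String),
      (if PySem.Str.len w < 3 then res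
       else if pvHitLoop pvPunct w then res
       else if pvHitLoop pvDigits w then res
       else res ++ [w])
      = (if (decide (3 ≤ PySem.Str.len w)
              && !(w.toList.any (fun c => PySem.Set.contains pvBad c))) = true
         then res ++ [w] else res) := by
    intro res w
    rw [← keep_agree]
    cases h2 : pvHitLoop pvPunct w <;> cases h3 : pvHitLoop pvDigits w <;>
      (simp [h2, h3]; try (split_ifs <;> first | rfl | omega))
  calc words.foldl (fun res w =>
        if PySem.Str.len w < 3 then res
        else if pvHitLoop pvPunct w then res
        else if pvHitLoop pvDigits w then res
        else res ++ [w]) []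
      = words.foldl (fun res w =>
          if (decide (3 ≤ PySem.Str.len w)
              && !(w.toList.any (fun c => PySem.Set.contains pvBad c))) = true
          then res ++ [w] else res) [] := by
        congr 1
        funext res w
        exact hbody res w
    _ = words.filter (fun w =>
          decide (3 ≤ PySem.Str.len w)
          && !(w.toList.any (fun c => PySem.Set.contains pvBad c))) := by
        rw [PySem.List.foldl_append_if_eq_filter]
        simp
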